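-- pv_equiv track=rewrite | github.com/pypa/hatch | tests/cli/publish/test_publish.py | remove_metadata_field
-- ===== SOURCE A (Python) =====
-- def remove_metadata_field(field: str, metadata_file_contents: str):
--     lines = metadata_file_contents.splitlines(True)
--
--     field_marker = f'{field}: '
--     indices_to_remove = []
--
--     for i, line in enumerate(lines):
--         if line.lower().startswith(field_marker):
--             indices_to_remove.append(i)
--
--     for i, index in enumerate(indices_to_remove):
--         del lines[index - i]
--
--     return ''.join(lines)
-- ===== SOURCE B (Python) =====
-- def remove_metadata_field(field: str, metadata_file_contents: str):
--     # Single streaming pass over the characters: build one line at a time and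
--     # emit it immediately unless it matches the field marker; never builds the
--     # full line list or an index list.
--     field_marker = f'{field}: '
--     out = []
--     cur = []
--     s = metadata_file_contents
--     n = len(s)
--     i = 0
--     while i < n:
--         ch = s[i]
--         cur.append(ch)
--         i += 1
--         if ch == '\n' or (ch == '\r' and not (i < n and s[i] == '\n')):
--             line = ''.join(cur)
--             if not line.lower().startswith(field_marker):
--                 out.append(line)
--             cur = []
--     if cur:
--         line = ''.join(cur)
--         if not line.lower().startswith(field_marker):
--             out.append(line)
--     return ''.join(out)
-- ===== Notes on version B (the rewrite author's own statement) =====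
-- stated objective: alternative
-- what changed: Replaces A's three-stage scheme (splitlines, collect match indices, offset-corrected in-place deletions, join) by one streaming character pass that assembles each line and emits it immediately unless it starts with the field marker.
import Mathlib
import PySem

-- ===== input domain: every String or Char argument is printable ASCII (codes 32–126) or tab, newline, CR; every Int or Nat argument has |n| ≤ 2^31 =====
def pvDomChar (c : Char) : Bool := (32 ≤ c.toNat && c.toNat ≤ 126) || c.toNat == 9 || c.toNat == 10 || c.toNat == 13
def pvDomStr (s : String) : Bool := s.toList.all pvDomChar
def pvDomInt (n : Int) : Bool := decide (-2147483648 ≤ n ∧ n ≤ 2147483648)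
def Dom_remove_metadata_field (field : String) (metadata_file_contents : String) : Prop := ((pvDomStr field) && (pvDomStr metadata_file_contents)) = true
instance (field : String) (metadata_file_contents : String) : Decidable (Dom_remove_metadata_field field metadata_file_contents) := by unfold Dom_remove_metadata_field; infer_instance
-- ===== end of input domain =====

-- B replaces A's three-stage splitlines / collect-indices / offset-corrected-deletion scheme
-- by one streaming character pass that emits each completed non-matching line (alternative).

-- ===== PORT A =====
-- Python's str.splitlines(keepends=True), exact on the ASCII domain
-- (the only line terminators in Dom are '\n', '\r' and '\r\n').
def pvSplitKeepGo : List Char → List Char → List (List Char)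
  | cur, [] => if cur.isEmpty then [] else [cur.reverse]
  | cur, '\r' :: '\n' :: rest => (cur.reverse ++ ['\r', '\n']) :: pvSplitKeepGo [] rest
  | cur, '\r' :: rest => (cur.reverse ++ ['\r']) :: pvSplitKeepGo [] rest
  | cur, '\n' :: rest => (cur.reverse ++ ['\n']) :: pvSplitKeepGo [] rest
  | cur, c :: rest => pvSplitKeepGo (c :: cur) rest
termination_by _ cs => cs.length

def pvSplitlinesKeep (s : String) : List (List Char) := pvSplitKeepGo [] s.toList

-- one iteration of A's deletion loop: 'del lines[index - i]' (index in range, so pop? never returns none)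
def pvDelStep {α : Type} (ls : List α) (q : Int × Int) : List α :=
  match PySem.List.pop? ls (q.2 - q.1) with
  | some r => r.2
  | none => ls

def remove_metadata_field (field : String) (metadata_file_contents : String) : String :=
  let lines := pvSplitlinesKeep metadata_file_contents
  let field_marker := field.toList ++ [':', ' ']
  let indices_to_remove :=
    (PySem.List.enumerate lines 0).foldl
      (fun acc q =>
        if PySem.Chars.startswith (PySem.Chars.lower q.2) field_marker then acc ++ [q.1] else acc)
      []
  let lines' :=
    (PySem.List.enumerate indices_to_remove 0).foldl
      pvDelStep
      lines
  String.ofList (PySem.Chars.join [] lines')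

-- ===== PORT B =====
-- 'line = ''.join(cur); out.append(line) unless it matches': emit a completed line
def pvEmit (marker : List Char) (line : List Char) : List Char :=
  if PySem.Chars.startswith (PySem.Chars.lower line) marker then [] else line

-- the streaming while-loop of Source B: cur holds the current line reversed; a line ends
-- at '\n', or at '\r' not followed by '\n'; leftover cur is flushed at the end
def pvStream (marker : List Char) : List Char → List Char → List Char
  | cur, [] => if cur.isEmpty then [] else pvEmit marker cur.reverse
  | cur, c :: rest =>
      if c == '\n' || (c == '\r' && !(rest.head? == some '\n')) then
        pvEmit marker (c :: cur).reverse ++ pvStream marker [] rest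
      else
        pvStream marker (c :: cur) rest

def remove_metadata_field_alt (field : String) (metadata_file_contents : String) : String :=
  let field_marker := field.toList ++ [':', ' ']
  String.ofList (pvStream field_marker [] metadata_file_contents.toList)

-- ===== PRECONDITION & SPEC =====
def Spec_remove_metadata_field (field : String) (metadata_file_contents : String) (out : String) : Prop := out = remove_metadata_field_alt field metadata_file_contents
instance (field : String) (metadata_file_contents : String) (out : String) : Decidable (Spec_remove_metadata_field field metadata_file_contents out) := by unfold Spec_remove_metadata_field; infer_instance

-- ===== CLAIM (what is proved, stated in full; the proofs are below) =====
def Claim_equal_remove_metadata_field : Prop := ∀ (field : String) (metadata_file_contents : String), Dom_remove_metadata_field field metadata_file_contents → Spec_remove_metadata_field field metadata_file_contents (remove_metadata_field field metadata_file_contents)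

-- ===== LEMMAS AND PROOFS =====

-- the ascending list of (0-based, offset k) indices of elements satisfying pr
def pvIdxs {α : Type} (pr : α → Bool) (k : Int) : List α → List Int
  | [] => []
  | x :: xs => if pr x then k :: pvIdxs pr (k + 1) xs else pvIdxs pr (k + 1) xs

theorem pvCollect_eq {α : Type} (pr : α → Bool) :
    ∀ (xs : List α) (acc : List Int) (k : Int),
      (PySem.List.enumerate xs k).foldl
        (fun a q => if pr q.2 then a ++ [q.1] else a) acc
      = acc ++ pvIdxs pr k xs := by
  intro xs
  induction xs with
  | nil => intro acc k; simp [pvIdxs, PySem.List.enumerate_nil]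
  | cons x xs ih =>
    intro acc k
    rw [PySem.List.enumerate_cons]
    by_cases h : pr x = true
    · simp [pvIdxs, h, List.foldl_cons, ih]
    · simp [pvIdxs, h, List.foldl_cons, ih]

theorem pvDelLoop_eq {α : Type} (pr : α → Bool) :
    ∀ (xs front : List α) (d : Int),
      (PySem.List.enumerate (pvIdxs pr (d + front.length) xs) d).foldl
        pvDelStep
        (front ++ xs)
      = front ++ xs.filter (fun x => !pr x) := by
  intro xs
  induction xs with
  | nil => intro front d; simp [pvIdxs, PySem.List.enumerate_nil]
  | cons x xs ih =>
    intro front d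
    by_cases h : pr x = true
    · rw [show pvIdxs pr (d + front.length) (x :: xs)
            = (d + front.length) :: pvIdxs pr (d + front.length + 1) xs from by
        simp [pvIdxs, h]]
      rw [PySem.List.enumerate_cons, List.foldl_cons]
      have hpop : PySem.List.pop? (front ++ x :: xs) ((d + front.length) - d)
          = some ((front ++ x :: xs)[front.length]'(by simp), (front ++ x :: xs).eraseIdx front.length) := by
        have harith : (d + front.length) - d = (front.length : Int) := by ring
        rw [harith]
        exact PySem.List.pop?_natCast _ _ (by simp)
      rw [show pvDelStep (front ++ x :: xs) (d, d + front.length)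
            = (front ++ x :: xs).eraseIdx front.length from by
        simp only [pvDelStep, hpop]]
      have herase : (front ++ x :: xs).eraseIdx front.length = front ++ xs := by
        rw [List.eraseIdx_append_of_length_le (le_refl _)]
        simp
      simp only [herase]
      rw [show d + (front.length : Int) + 1 = (d + 1) + front.length from by ring]
      rw [ih front (d + 1)]
      simp [h]
    · rw [show pvIdxs pr (d + front.length) (x :: xs)
            = pvIdxs pr (d + front.length + 1) xs from by simp [pvIdxs, h]]
      rw [show d + (front.length : Int) + 1 = d + ((front ++ [x]).length : Int) from by
        simp; ring]
      have := ih (front ++ [x]) d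
      rw [List.append_assoc] at this
      simp only [List.singleton_append] at this
      rw [this]
      simp [h]

theorem pvJoin_nil_cons (l : List Char) (ls : List (List Char)) :
    PySem.Chars.join [] (l :: ls) = l ++ PySem.Chars.join [] ls := by
  cases ls with
  | nil => simp [PySem.Chars.join_singleton, PySem.Chars.join_nil]
  | cons m ms => rw [PySem.Chars.join_cons_cons]; simp

-- the streaming pass computes the joined filter of splitlines(True)
theorem pvStream_eq (marker : List Char) :
    ∀ (cur cs : List Char),
      pvStream marker cur cs
        = PySem.Chars.join []
            ((pvSplitKeepGo cur cs).filter
              (fun l => !PySem.Chars.startswith (PySem.Chars.lower l) marker)) := by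
  intro cur cs
  induction cur, cs using pvSplitKeepGo.induct with
  | case1 cur h =>
    simp [pvStream, pvSplitKeepGo, h, PySem.Chars.join_nil]
  | case2 cur h =>
    rw [show pvStream marker cur [] = pvEmit marker cur.reverse from by
      simp [pvStream, h]]
    rw [show pvSplitKeepGo cur [] = [cur.reverse] from by simp [pvSplitKeepGo, h]]
    by_cases hk : PySem.Chars.startswith (PySem.Chars.lower cur.reverse) marker
    · simp [pvEmit, hk, PySem.Chars.join_nil]
    · simp [pvEmit, hk, PySem.Chars.join_singleton]
  | case3 cur rest ih =>
    rw [show pvStream marker cur ('\r' :: '\n' :: rest)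
          = pvStream marker ('\r' :: cur) ('\n' :: rest) from by simp [pvStream]]
    rw [show pvStream marker ('\r' :: cur) ('\n' :: rest)
          = pvEmit marker ('\n' :: '\r' :: cur).reverse ++ pvStream marker [] rest from by
      simp [pvStream]]
    rw [pvSplitKeepGo.eq_2 cur rest]
    have hline : ('\n' :: '\r' :: cur).reverse = cur.reverse ++ ['\r', '\n'] := by simp
    rw [hline, ih]
    by_cases hk : PySem.Chars.startswith (PySem.Chars.lower (cur.reverse ++ ['\r', '\n'])) marker
    · simp [pvEmit, hk]
    · simp [pvEmit, hk, pvJoin_nil_cons]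
  | case4 cur rest hne ih =>
    have hhead : (rest.head? == some '\n') = false := by
      cases rest with
      | nil => rfl
      | cons d ds =>
        have hd : d ≠ '\n' := fun h => hne ds (by simp [h])
        simp [hd]
    rw [show pvStream marker cur ('\r' :: rest)
          = pvEmit marker ('\r' :: cur).reverse ++ pvStream marker [] rest from by
      simp [pvStream, hhead]]
    rw [pvSplitKeepGo.eq_3 cur rest (fun r h => hne r h)]
    have hline : ('\r' :: cur).reverse = cur.reverse ++ ['\r'] := by simp
    rw [hline, ih]
    by_cases hk : PySem.Chars.startswith (PySem.Chars.lower (cur.reverse ++ ['\r'])) marker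
    · simp [pvEmit, hk]
    · simp [pvEmit, hk, pvJoin_nil_cons]
  | case5 cur rest ih =>
    rw [show pvStream marker cur ('\n' :: rest)
          = pvEmit marker ('\n' :: cur).reverse ++ pvStream marker [] rest from by
      simp [pvStream]]
    rw [pvSplitKeepGo.eq_4 cur rest]
    have hline : ('\n' :: cur).reverse = cur.reverse ++ ['\n'] := by simp
    rw [hline, ih]
    by_cases hk : PySem.Chars.startswith (PySem.Chars.lower (cur.reverse ++ ['\n'])) marker
    · simp [pvEmit, hk]
    · simp [pvEmit, hk, pvJoin_nil_cons]
  | case6 cur c rest h1 h2 h3 ih =>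
    have hc1 : (c == '\n') = false := by
      cases h : c == '\n'
      · rfl
      · exact absurd (h3 (by simpa using h)) (by simp)
    have hc2 : (c == '\r') = false := by
      cases h : c == '\r'
      · rfl
      · exact absurd (h2 (by simpa using h)) (by simp)
    rw [show pvStream marker cur (c :: rest)
          = pvStream marker (c :: cur) rest from by
      simp [pvStream, hc1, hc2]]
    rw [pvSplitKeepGo.eq_5 cur c rest (fun r hr _ => h2 hr) h2 h3]
    exact ih

-- ===== VERDICT (by name: the statement is the Claim_ definition above) =====
theorem remove_metadata_field_spec : Claim_equal_remove_metadata_field := by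
  intro field contents _
  show _ = _
  unfold remove_metadata_field remove_metadata_field_alt
  simp only
  rw [pvCollect_eq (fun line => PySem.Chars.startswith (PySem.Chars.lower line) (field.toList ++ [':', ' '])) (pvSplitlinesKeep contents) [] 0, List.nil_append]
  have hA := pvDelLoop_eq
    (fun line => PySem.Chars.startswith (PySem.Chars.lower line) (field.toList ++ [':', ' ']))
    (pvSplitlinesKeep contents) [] 0
  simp only [List.nil_append, List.length_nil, Nat.cast_zero, add_zero] at hA
  rw [hA, pvStream_eq]
  rfl
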